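-- pv_equiv track=rewrite | github.com/StBinge/leetcode | 2567.minimum-score-by-changing-two-elements.py | minimizeSum
-- ===== SOURCE A (Python) =====
-- from typing import List
--
-- def minimizeSum(nums: List[int]) -> int:
--     mi0=mi1=mi2=float('inf')
--     mx0=mx1=mx2=float('-inf')
--     for n in nums:
--         if n<mi0:
--             mi0,mi1,mi2=n,mi0,mi1
--         elif n<mi1:
--             mi1,mi2=n,mi1
--         elif n<mi2:
--             mi2=n
--
--         if n>mx0:
--             mx0,mx1,mx2=n,mx0,mx1
--         elif n>mx1:
--             mx1,mx2=n,mx1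
--         elif n>mx2:
--             mx2=n
--
--     return min(mx0-mi2,mx2-mi0,mx1-mi1)
-- ===== SOURCE B (Python) =====
-- def minimizeSum(nums):
--     s = sorted(nums)
--     return min(s[-3] - s[0], s[-1] - s[2], s[-2] - s[1])
-- ===== Notes on version B (the rewrite author's own statement) =====
-- stated objective: simpler
-- what changed: Replaces the incremental three-smallest/three-largest tracking fold (with +/-inf sentinels) by a single sort followed by direct indexing into the three extremes at each end; Pre_ excludes lists shorter than 3, where A returns float('-inf') (not an int) and B raises IndexError.
-- outside the precondition, e.g. on minimizeSum([1, 2]): A returns -inf, B raises IndexError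
import Mathlib
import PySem

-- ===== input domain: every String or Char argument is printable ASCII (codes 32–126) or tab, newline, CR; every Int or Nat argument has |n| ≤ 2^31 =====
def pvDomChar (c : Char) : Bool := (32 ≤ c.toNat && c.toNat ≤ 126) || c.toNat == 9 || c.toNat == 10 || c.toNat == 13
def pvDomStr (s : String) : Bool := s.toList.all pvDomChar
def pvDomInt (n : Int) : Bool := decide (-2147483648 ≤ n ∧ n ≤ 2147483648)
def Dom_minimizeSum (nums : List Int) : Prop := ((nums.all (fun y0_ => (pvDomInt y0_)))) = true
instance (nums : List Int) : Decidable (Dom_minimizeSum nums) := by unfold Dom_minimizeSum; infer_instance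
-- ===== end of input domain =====

-- B replaces A's incremental three-min/three-max tracking fold by one sort plus direct
-- indexing into the extremes (objective: simpler); A = B is proved on lists of length ≥ 3.


-- ===== PORT A =====
-- 'none' models the float('inf') / float('-inf') sentinels left in unfilled slots:
-- a comparison of an int against that sentinel is true, exactly as in Python.
def pvLtO (n : Int) (o : Option Int) : Bool :=
  match o with
  | none => true          -- n < float('inf')
  | some m => decide (n < m)

def pvGtO (n : Int) (o : Option Int) : Bool :=
  match o with
  | none => true          -- n > float('-inf')
  | some m => decide (m < n)

def pvMinStep (st : Option Int × Option Int × Option Int) (n : Int) :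
    Option Int × Option Int × Option Int :=
  if pvLtO n st.1 then (some n, st.1, st.2.1)
  else if pvLtO n st.2.1 then (st.1, some n, st.2.1)
  else if pvLtO n st.2.2 then (st.1, st.2.1, some n)
  else st

def pvMaxStep (st : Option Int × Option Int × Option Int) (n : Int) :
    Option Int × Option Int × Option Int :=
  if pvGtO n st.1 then (some n, st.1, st.2.1)
  else if pvGtO n st.2.1 then (st.1, some n, st.2.1)
  else if pvGtO n st.2.2 then (st.1, st.2.1, some n)
  else st

def minimizeSum (nums : List Int) : Int :=
  let st := nums.foldl (fun p n => (pvMinStep p.1 n, pvMaxStep p.2 n))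
      ((none, none, none), (none, none, none))
  match st with
  | ((some mi0, some mi1, some mi2), (some mx0, some mx1, some mx2)) =>
      min (min (mx0 - mi2) (mx2 - mi0)) (mx1 - mi1)
  | _ => 0  -- here Python's A returns a float (-inf), not an int; excluded by Pre_

-- ===== PORT B =====
-- each s[i] is pyGetD (total indexing): exact under Pre_ (3 ≤ length, every index in range);
-- below 3 elements Python's B raises IndexError, and those inputs are excluded by Pre_.
def minimizeSum_alt (nums : List Int) : Int :=
  let s := PySem.List.sorted nums (fun x => x) false
  min (min (PySem.List.pyGetD s (-3) 0 - PySem.List.pyGetD s 0 0)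
           (PySem.List.pyGetD s (-1) 0 - PySem.List.pyGetD s 2 0))
      (PySem.List.pyGetD s (-2) 0 - PySem.List.pyGetD s 1 0)

-- ===== PRECONDITION & SPEC =====
-- Pre_ excludes lists with fewer than 3 elements: there A leaves ±inf sentinels in the
-- unfilled slots and returns float('-inf'), which is not a value of the declared int type
-- (and B raises IndexError).
def Pre_minimizeSum (nums : List Int) : Prop := 3 ≤ nums.length
instance (nums : List Int) : Decidable (Pre_minimizeSum nums) := by
  unfold Pre_minimizeSum; infer_instance

def pvWitness_minimizeSum : List Int := [1, 2, 3]

def Spec_minimizeSum (nums : List Int) (out : Int) : Prop := out = minimizeSum_alt nums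
instance (nums : List Int) (out : Int) : Decidable (Spec_minimizeSum nums out) := by
  unfold Spec_minimizeSum; infer_instance

-- ===== CLAIM (what is proved, stated in full; the proofs are below) =====
def Claim_equal_minimizeSum : Prop := ∀ (nums : List Int), Dom_minimizeSum nums →
  Pre_minimizeSum nums → Spec_minimizeSum nums (minimizeSum nums)

-- ===== LEMMAS AND PROOFS =====
def pvTri (l : List Int) : Option Int × Option Int × Option Int := (l[0]?, l[1]?, l[2]?)

def pvNegT (st : Option Int × Option Int × Option Int) :
    Option Int × Option Int × Option Int :=
  (st.1.map Neg.neg, st.2.1.map Neg.neg, st.2.2.map Neg.neg)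

def pvIns (n : Int) (l : List Int) : List Int :=
  PySem.List.insertBy (fun a b => decide (a < b)) n l

theorem pvTri_ins (l : List Int) (n : Int) : pvTri (pvIns n l) = pvMinStep (pvTri l) n := by
  rcases l with _ | ⟨a, _ | ⟨b, _ | ⟨c, t⟩⟩⟩ <;>
    simp [pvIns, pvTri, pvMinStep, PySem.List.insertBy, pvLtO] <;>
    split_ifs <;> simp_all

theorem pvFold_min (xs : List Int) : ∀ l : List Int,
    xs.foldl pvMinStep (pvTri l) = pvTri (xs.foldl (fun acc x => pvIns x acc) l) := by
  induction xs with
  | nil => intro l; rfl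
  | cons x xs ih =>
      intro l
      simp only [List.foldl_cons, ← pvTri_ins l x]
      exact ih (pvIns x l)

theorem pvMin_sorted (nums : List Int) :
    nums.foldl pvMinStep ((none, none, none)) =
      pvTri (PySem.List.sorted nums (fun x => x) false) := by
  have h := pvFold_min nums []
  simpa [pvTri, PySem.List.sorted_eq_foldl_insertBy, pvIns] using h

theorem pvNegT_invol (st : Option Int × Option Int × Option Int) : pvNegT (pvNegT st) = st := by
  obtain ⟨a, b, c⟩ := st
  simp [pvNegT, Option.map_map]

theorem pvMax_neg (st : Option Int × Option Int × Option Int) (n : Int) :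
    pvMaxStep st n = pvNegT (pvMinStep (pvNegT st) (-n)) := by
  obtain ⟨a, b, c⟩ := st
  rcases a with _ | a <;> rcases b with _ | b <;> rcases c with _ | c <;>
    simp [pvMaxStep, pvMinStep, pvNegT, pvGtO, pvLtO] <;>
    split_ifs <;> simp_all

theorem pvFold_max (xs : List Int) : ∀ st,
    xs.foldl pvMaxStep st =
      pvNegT ((xs.map (fun n => -n)).foldl pvMinStep (pvNegT st)) := by
  induction xs with
  | nil => intro st; simp [pvNegT_invol]
  | cons x xs ih =>
      intro st
      simp only [List.foldl_cons, List.map_cons, pvMax_neg st x, ih, pvNegT_invol]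

theorem pvFold_pair (xs : List Int) :
    ∀ a b : Option Int × Option Int × Option Int,
    xs.foldl (fun p n => (pvMinStep p.1 n, pvMaxStep p.2 n)) (a, b) =
      (xs.foldl pvMinStep a, xs.foldl pvMaxStep b) := by
  induction xs with
  | nil => intro a b; rfl
  | cons x xs ih => intro a b; simp only [List.foldl_cons, ih]

theorem pvFold_max_sorted (nums : List Int) :
    nums.foldl pvMaxStep ((none, none, none)) =
      pvNegT (pvTri (PySem.List.sorted (nums.map (fun n => -n)) (fun x => x) false)) := by
  rw [pvFold_max]
  have h : pvNegT ((none, none, none)) = ((none, none, none) :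
      Option Int × Option Int × Option Int) := rfl
  rw [h, pvMin_sorted]

theorem pvSorted_neg (nums : List Int) :
    PySem.List.sorted (nums.map (fun n => -n)) (fun x => x) false =
      ((PySem.List.sorted nums (fun x => x) false).map (fun n => -n)).reverse := by
  apply List.Perm.eq_of_pairwise (le := fun a b => a ≤ b)
  · intro a b _ _ h1 h2; omega
  · exact PySem.List.sorted_pairwise _ _
  · rw [List.pairwise_reverse, List.pairwise_map]
    have := PySem.List.sorted_pairwise nums (fun x => x)
    exact this.imp (by intro a b h; simpa using h)
  · have hA := PySem.List.sorted_perm (nums.map (fun n => -n)) (fun x => x) false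
    have hB := (PySem.List.sorted_perm nums (fun x => x) false).map (fun n => -n)
    have hC := List.reverse_perm ((PySem.List.sorted nums (fun x => x) false).map (fun n => -n))
    exact hA.trans ((hC.trans hB).symm)

-- ===== VERDICT (by name: the statement is the Claim_ definition above) =====
theorem minimizeSum_spec : Claim_equal_minimizeSum := by
  intro nums _ hpre
  unfold Pre_minimizeSum at hpre
  unfold Spec_minimizeSum minimizeSum minimizeSum_alt
  set s := PySem.List.sorted nums (fun x => x) false with hs
  have hm : s.length = nums.length := PySem.List.length_sorted _ _ _
  have hlen : 3 ≤ s.length := by omega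
  rw [pvFold_pair, pvMin_sorted, pvFold_max_sorted, pvSorted_neg]
  have hrev : ∀ i : Nat, i < 3 →
      ((s.map (fun n => -n)).reverse)[i]? = (s[s.length - 1 - i]?).map (fun n => -n) := by
    intro i hi
    rw [List.getElem?_reverse (by simpa using by omega), List.getElem?_map]
    simp
  have h0 : s[0]? = some s[0] := List.getElem?_eq_getElem (by omega)
  have h1 : s[1]? = some s[1] := List.getElem?_eq_getElem (by omega)
  have h2 : s[2]? = some s[2] := List.getElem?_eq_getElem (by omega)
  have g1 : s[s.length - 1]? = some s[s.length - 1] := List.getElem?_eq_getElem (by omega)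
  have g2 : s[s.length - 2]? = some s[s.length - 2] := List.getElem?_eq_getElem (by omega)
  have g3 : s[s.length - 3]? = some s[s.length - 3] := List.getElem?_eq_getElem (by omega)
  have e3 : PySem.List.pyGetD s (-3) 0 = s[s.length - 3] :=
    PySem.List.pyGetD_neg_ofNat s 3 0 (by omega) (by omega)
  have e2 : PySem.List.pyGetD s (-2) 0 = s[s.length - 2] :=
    PySem.List.pyGetD_neg_ofNat s 2 0 (by omega) (by omega)
  have e1 : PySem.List.pyGetD s (-1) 0 = s[s.length - 1] :=
    PySem.List.pyGetD_neg_ofNat s 1 0 (by omega) (by omega)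
  have p0 : PySem.List.pyGetD s 0 0 = s[0] := by
    simpa using PySem.List.pyGetD_eq_getElem s (i := 0) 0 (by omega) (by omega)
  have p1 : PySem.List.pyGetD s 1 0 = s[1] := by
    simpa using PySem.List.pyGetD_eq_getElem s (i := 1) 0 (by omega) (by omega)
  have p2 : PySem.List.pyGetD s 2 0 = s[2] := by
    simpa using PySem.List.pyGetD_eq_getElem s (i := 2) 0 (by omega) (by omega)
  simp only [← hs]
  simp only [pvTri, pvNegT, hrev 0 (by omega), hrev 1 (by omega), hrev 2 (by omega),
    e1, e2, e3, p0, p1, p2, h0, h1, h2, Nat.sub_sub, Nat.sub_zero]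
  norm_num [g1, g2, g3, neg_neg]
  rw [min_left_comm]
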